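-- pv_equiv track=rewrite | github.com/boyski33/Hack_Bulgaria_Problems | week01/diveintopython.py | is_transversal
-- ===== SOURCE A (Python) =====
-- def is_transversal(transversal, family):
--
-- 	family_flags = [0 for x in range(len(family))]
--
-- 	for element in transversal:
-- 		for i in range(len(family)):
-- 			for el in family[i]:
-- 				if element == el:
-- 					family_flags[i] = 1
-- 					break
--
-- 	for flag in family_flags:
-- 		if flag == 0:
-- 			return False
--
--
-- 	return True
-- ===== SOURCE B (Python) =====
-- def is_transversal(transversal, family):
--     # inverted index: element value -> set of family indices whose set contains it
--     index = {}
--     for i, s in enumerate(family):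
--         for el in s:
--             index.setdefault(el, set()).add(i)
--     covered = set()
--     for element in transversal:
--         covered.update(index.get(element, ()))
--     return len(covered) == len(family)
-- ===== Notes on version B (the rewrite author's own statement) =====
-- stated objective: faster
-- what changed: Replaces the per-element triple loop over a flags array with an inverted index (element -> set of family indices) built in one pass, then a single pass over the transversal accumulating a covered-index set and comparing its size to len(family).
import Mathlib
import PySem

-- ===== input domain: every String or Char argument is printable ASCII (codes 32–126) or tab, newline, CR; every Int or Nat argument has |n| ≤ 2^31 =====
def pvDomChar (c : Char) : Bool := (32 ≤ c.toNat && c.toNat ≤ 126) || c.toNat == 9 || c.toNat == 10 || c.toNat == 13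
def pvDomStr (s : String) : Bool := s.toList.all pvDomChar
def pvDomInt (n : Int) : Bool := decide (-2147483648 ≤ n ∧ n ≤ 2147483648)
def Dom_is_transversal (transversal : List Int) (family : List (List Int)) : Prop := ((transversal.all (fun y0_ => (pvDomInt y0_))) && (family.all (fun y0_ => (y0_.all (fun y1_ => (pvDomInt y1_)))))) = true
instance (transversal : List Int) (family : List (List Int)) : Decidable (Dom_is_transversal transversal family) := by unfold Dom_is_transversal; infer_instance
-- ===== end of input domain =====

-- B replaces A's triple loop over a flags array by an inverted index (element -> set of
-- family indices) built once, then one pass over the transversal accumulating a covered-index set.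

-- ===== PORT A =====
-- inner 'for el in family[i]: if element == el: … break' — returns whether the flag is set
def pvScan (element : Int) : List Int → Bool
  | [] => false
  | el :: rest => if element == el then true else pvScan element rest

-- final 'for flag in family_flags: if flag == 0: return False' … 'return True'
def pvCheck : List Int → Bool
  | [] => true
  | f :: rest => if f == 0 then false else pvCheck rest

def is_transversal (transversal : List Int) (family : List (List Int)) : Bool :=
  let family_flags : List Int := (PySem.List.pyRange 0 (family.length : Int) 1).map (fun _ => (0 : Int))
  let flags := transversal.foldl
    (fun fl element =>
      (PySem.List.pyRange 0 (family.length : Int) 1).foldl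
        (fun fl i =>
          if pvScan element (PySem.List.pyGetD family i []) then PySem.List.pySetD fl i 1 else fl)
        fl)
    family_flags
  pvCheck flags

-- ===== PORT B =====
def is_transversal_alt (transversal : List Int) (family : List (List Int)) : Bool :=
  let index : PySem.Dict Int (PySem.Set Int) :=
    (PySem.List.enumerate family 0).foldl
      (fun d p =>
        p.2.foldl (fun d el => d.modify el PySem.Set.empty (fun st => PySem.Set.add st p.1)) d)
      PySem.Dict.empty
  let covered : PySem.Set Int :=
    transversal.foldl
      (fun c element => PySem.Set.update c (index.getD element PySem.Set.empty))
      PySem.Set.empty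
  covered.length == family.length

-- ===== PRECONDITION & SPEC =====
def Spec_is_transversal (transversal : List Int) (family : List (List Int)) (out : Bool) : Prop := out = is_transversal_alt transversal family
instance (transversal : List Int) (family : List (List Int)) (out : Bool) : Decidable (Spec_is_transversal transversal family out) := by unfold Spec_is_transversal; infer_instance

-- ===== CLAIM (what is proved, stated in full; the proofs are below) =====
def Claim_equal_is_transversal : Prop := ∀ (transversal : List Int) (family : List (List Int)), Dom_is_transversal transversal family → Spec_is_transversal transversal family (is_transversal transversal family)

-- ===== LEMMAS AND PROOFS =====

theorem pvScan_eq (e : Int) (l : List Int) : pvScan e l = decide (e ∈ l) := by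
  induction l with
  | nil => simp [pvScan]
  | cons x r ih => by_cases h : e = x <;> simp [pvScan, h, ih]

theorem pvCheck_eq (l : List Int) : pvCheck l = l.all (fun f => !(f == 0)) := by
  induction l with
  | nil => rfl
  | cons x r ih => by_cases h : x = (0:Int) <;> simp [pvCheck, h, ih]

-- inner dict-building loop over one family set
theorem pvInner_getD (s : List Int) (i : Int) (d : PySem.Dict Int (PySem.Set Int)) (x : Int) :
    (s.foldl (fun d el => d.modify el PySem.Set.empty (fun st => PySem.Set.add st i)) d).getD x PySem.Set.empty
      = if x ∈ s then PySem.Set.add (d.getD x PySem.Set.empty) i else d.getD x PySem.Set.empty := by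
  induction s generalizing d with
  | nil => simp
  | cons el r ih =>
      simp only [List.foldl_cons, ih, PySem.Dict.getD_modify]
      by_cases hx : x = el <;> by_cases hr : x ∈ r <;>
        simp [hx, hr]

-- outer dict-building loop: membership in the looked-up index set
theorem pvIndex_mem (fam : List (List Int)) (s : Int) (d : PySem.Dict Int (PySem.Set Int))
    (x j : Int) :
    (j ∈ ((PySem.List.enumerate fam s).foldl
        (fun d p => p.2.foldl (fun d el => d.modify el PySem.Set.empty (fun st => PySem.Set.add st p.1)) d)
        d).getD x PySem.Set.empty)
      ↔ j ∈ d.getD x PySem.Set.empty ∨ ∃ k : Nat, ∃ _ : k < fam.length, x ∈ fam[k] ∧ j = s + k := by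
  induction fam generalizing s d with
  | nil => simp [PySem.List.enumerate]
  | cons hd tl ih =>
      rw [PySem.List.enumerate_cons, List.foldl_cons, ih]
      constructor
      · rintro (h | ⟨k, hk, hx, hj⟩)
        · rw [pvInner_getD] at h
          by_cases hmem : x ∈ hd
          · rw [if_pos hmem, PySem.Set.mem_add] at h
            rcases h with h | h
            · exact Or.inl h
            · exact Or.inr ⟨0, by simp, by simpa, by simpa using h⟩
          · rw [if_neg hmem] at h; exact Or.inl h
        · refine Or.inr ⟨k + 1, by simp; omega, by simpa using hx, ?_⟩
          push_cast at hj ⊢; omega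
      · rintro (h | ⟨k, hk, hx, hj⟩)
        · left; rw [pvInner_getD]; split_ifs with hmem
          · exact (PySem.Set.mem_add _ _ _).mpr (Or.inl h)
          · exact h
        · match k with
          | 0 =>
              left; rw [pvInner_getD, if_pos (by simpa using hx)]
              exact (PySem.Set.mem_add _ _ _).mpr (Or.inr (by simpa using hj))
          | k' + 1 =>
              refine Or.inr ⟨k', by simp at hk; omega, by simpa using hx, ?_⟩
              push_cast at hj ⊢; omega

-- covered-set loop: membership
theorem pvCovered_mem (ts : List Int) (g : Int → PySem.Set Int) (c : PySem.Set Int) (j : Int) :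
    (j ∈ ts.foldl (fun c e => PySem.Set.update c (g e)) c)
      ↔ j ∈ c ∨ ∃ t ∈ ts, j ∈ g t := by
  induction ts generalizing c with
  | nil => simp
  | cons t r ih =>
      rw [List.foldl_cons, ih]
      simp [PySem.Set.mem_update, or_assoc]

theorem pvCovered_nodup (ts : List Int) (g : Int → PySem.Set Int) (c : PySem.Set Int)
    (hc : c.Nodup) : (ts.foldl (fun c e => PySem.Set.update c (g e)) c).Nodup := by
  induction ts generalizing c with
  | nil => exact hc
  | cons t r ih => exact ih _ (PySem.Set.nodup_update _ _ hc)

-- A-side: one pass over the index range of the flags list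
theorem pvSetFold_getD (p : Nat → Bool) (l : List Nat) (fl : List Int) (j : Nat)
    (hj : j < fl.length) :
    (l.foldl (fun fl k => if p k then fl.set k 1 else fl) fl).getD j 0
      = if j ∈ l ∧ p j then 1 else fl.getD j 0 := by
  induction l generalizing fl with
  | nil => simp
  | cons k r ih =>
      rw [List.foldl_cons]
      have hlen : (if p k then fl.set k 1 else fl).length = fl.length := by
        split_ifs <;> simp
      rw [ih _ (by omega)]
      have hstep : (if p k then fl.set k 1 else fl).getD j 0
          = if j = k ∧ p k = true then 1 else fl.getD j 0 := by
        by_cases hjk : j = k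
        · subst hjk
          by_cases hpk : p j <;>
            simp [hpk, List.getD_eq_getElem?_getD, hj]
        · by_cases hpk : p k <;>
            simp [hpk, hjk, List.getD_eq_getElem?_getD, Ne.symm hjk]
      rw [hstep]
      by_cases h1 : j ∈ r <;> by_cases h2 : p j <;> by_cases h3 : j = k <;> simp_all

theorem pvSetFold_length (p : Nat → Bool) (l : List Nat) (fl : List Int) :
    (l.foldl (fun fl k => if p k then fl.set k 1 else fl) fl).length = fl.length := by
  induction l generalizing fl with
  | nil => rfl
  | cons k r ih => rw [List.foldl_cons, ih]; split_ifs <;> simp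

-- the per-element step of A rewritten over Nat indices
theorem pvStep_eq (family : List (List Int)) (e : Int) (fl : List Int) :
    (PySem.List.pyRange 0 (family.length : Int) 1).foldl
        (fun fl i => if pvScan e (PySem.List.pyGetD family i []) then PySem.List.pySetD fl i 1 else fl) fl
      = (List.range family.length).foldl
          (fun fl k => if decide (e ∈ family.getD k []) then fl.set k 1 else fl) fl := by
  rw [PySem.List.pyRange_zero_nat, List.foldl_map]
  apply PySem.List.foldl_congr_mem
  intro acc k hk
  simp only [List.mem_range] at hk
  rw [pvScan_eq, PySem.List.pyGetD_natCast]
  split_ifs <;> simp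

theorem pvFlags_getD (family : List (List Int)) (ts : List Int) (fl : List Int) (j : Nat)
    (hlen : fl.length = family.length) (hj : j < family.length) :
    (ts.foldl
        (fun fl element =>
          (PySem.List.pyRange 0 (family.length : Int) 1).foldl
            (fun fl i => if pvScan element (PySem.List.pyGetD family i []) then PySem.List.pySetD fl i 1 else fl) fl)
        fl).getD j 0
      = if ∃ t ∈ ts, t ∈ family.getD j [] then 1 else fl.getD j 0 := by
  induction ts generalizing fl with
  | nil => simp
  | cons t r ih =>
      rw [List.foldl_cons, pvStep_eq]
      have hlen2 : ((List.range family.length).foldl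
          (fun fl k => if decide (t ∈ family.getD k []) then fl.set k 1 else fl) fl).length
          = family.length := by rw [pvSetFold_length]; exact hlen
      rw [ih _ hlen2, pvSetFold_getD _ _ _ _ (by omega)]
      simp only [List.mem_range, hj, true_and, decide_eq_true_eq]
      by_cases h1 : ∃ x ∈ r, x ∈ family.getD j []
      · have hc : ∃ x ∈ t :: r, x ∈ family.getD j [] := by
          rcases h1 with ⟨x, hx1, hx2⟩
          exact ⟨x, List.mem_cons_of_mem _ hx1, hx2⟩
        rw [if_pos h1, if_pos hc]
      · rw [if_neg h1]
        by_cases h2 : t ∈ family.getD j []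
        · rw [if_pos h2, if_pos ⟨t, List.mem_cons_self, h2⟩]
        · have hc : ¬ ∃ x ∈ t :: r, x ∈ family.getD j [] := by
            rintro ⟨x, hx1, hx2⟩
            rcases List.mem_cons.mp hx1 with rfl | hx1
            · exact h2 hx2
            · exact h1 ⟨x, hx1, hx2⟩
          rw [if_neg h2, if_neg hc]

theorem pvFlags_length (family : List (List Int)) (ts : List Int) (fl : List Int) :
    (ts.foldl
        (fun fl element =>
          (PySem.List.pyRange 0 (family.length : Int) 1).foldl
            (fun fl i => if pvScan element (PySem.List.pyGetD family i []) then PySem.List.pySetD fl i 1 else fl) fl)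
        fl).length = fl.length := by
  induction ts generalizing fl with
  | nil => rfl
  | cons t r ih => rw [List.foldl_cons, pvStep_eq, ih, pvSetFold_length]

theorem pvA_iff (transversal : List Int) (family : List (List Int)) :
    is_transversal transversal family = true
      ↔ ∀ j : Nat, j < family.length → ∃ t ∈ transversal, t ∈ family.getD j [] := by
  unfold is_transversal
  simp only
  have hinit : (PySem.List.pyRange 0 (family.length : Int) 1).map (fun _ => (0 : Int))
      = List.replicate family.length (0 : Int) := by
    rw [List.eq_replicate_iff]
    constructor
    · simp [PySem.List.length_pyRange_one]
    · intro b hb; simp only [List.mem_map] at hb; rcases hb with ⟨_, _, rfl⟩; rfl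
  rw [hinit]
  set flags := transversal.foldl
      (fun fl element =>
        (PySem.List.pyRange 0 (family.length : Int) 1).foldl
          (fun fl i => if pvScan element (PySem.List.pyGetD family i []) then PySem.List.pySetD fl i 1 else fl) fl)
      (List.replicate family.length (0 : Int)) with hflags
  have hlen : flags.length = family.length := by
    rw [hflags, pvFlags_length family transversal]; simp
  have hval : ∀ j : Nat, j < family.length →
      flags.getD j 0 = if ∃ t ∈ transversal, t ∈ family.getD j [] then 1 else 0 := by
    intro j hj
    rw [hflags, pvFlags_getD family transversal _ j (by simp) hj]
    have hrep : (List.replicate family.length (0 : Int)).getD j 0 = 0 := by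
      simp [List.getD_eq_getElem?_getD, hj]
    rw [hrep]
  rw [pvCheck_eq, List.all_eq_true]
  constructor
  · intro h j hj
    by_cases hq : ∃ t ∈ transversal, t ∈ family.getD j []
    · exact hq
    · exfalso
      have h0 : flags.getD j 0 = 0 := by rw [hval j hj, if_neg hq]
      have hjl : j < flags.length := by omega
      have hmem : (0 : Int) ∈ flags := by
        rw [← h0, List.getD_eq_getElem _ _ hjl]
        exact List.getElem_mem _
      simpa using h _ hmem
  · intro h x hx
    rcases List.mem_iff_getElem.mp hx with ⟨j, hjlt, rfl⟩
    have hj : j < family.length := by omega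
    have := hval j hj
    rw [if_pos (h j hj), List.getD_eq_getElem _ _ hjlt] at this
    simp [this]

theorem pvB_iff (transversal : List Int) (family : List (List Int)) :
    is_transversal_alt transversal family = true
      ↔ ∀ j : Nat, j < family.length → ∃ t ∈ transversal, t ∈ family.getD j [] := by
  unfold is_transversal_alt
  simp only [beq_iff_eq]
  set n := family.length with hn
  set index : PySem.Dict Int (PySem.Set Int) :=
    (PySem.List.enumerate family 0).foldl
      (fun d p =>
        p.2.foldl (fun d el => d.modify el PySem.Set.empty (fun st => PySem.Set.add st p.1)) d)
      PySem.Dict.empty with hindex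
  set covered : PySem.Set Int :=
    transversal.foldl
      (fun c element => PySem.Set.update c (index.getD element PySem.Set.empty))
      PySem.Set.empty with hcov
  have hmem : ∀ j : Int, j ∈ covered
      ↔ ∃ k : Nat, k < n ∧ (∃ t ∈ transversal, t ∈ family.getD k []) ∧ j = (k : Int) := by
    intro j
    rw [hcov, pvCovered_mem]
    constructor
    · rintro (hj | ⟨t, ht, hj⟩)
      · exact absurd hj (by simp [PySem.Set.empty])
      · rw [hindex, pvIndex_mem] at hj
        rcases hj with hj | ⟨k, hk, hx, hj⟩
        · rw [PySem.Dict.getD_empty] at hj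
          exact absurd hj (by simp [PySem.Set.empty])
        · exact ⟨k, hk, ⟨t, ht, by rwa [List.getD_eq_getElem _ _ hk]⟩, by omega⟩
    · rintro ⟨k, hk, ⟨t, ht, hx⟩, rfl⟩
      refine Or.inr ⟨t, ht, ?_⟩
      rw [hindex, pvIndex_mem]
      exact Or.inr ⟨k, hk, by rwa [List.getD_eq_getElem _ _ hk] at hx, by omega⟩
  have hnodup : covered.Nodup := pvCovered_nodup _ _ _ List.nodup_nil
  have hsub : covered ⊆ (List.range n).map Int.ofNat := by
    intro j hj
    rcases (hmem j).mp hj with ⟨k, hk, _, rfl⟩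
    exact List.mem_map.mpr ⟨k, List.mem_range.mpr hk, rfl⟩
  have hSnodup : ((List.range n).map Int.ofNat).Nodup :=
    List.nodup_range.map (fun a b h => Int.ofNat_inj.mp h)
  have hSlen : ((List.range n).map Int.ofNat).length = n := by simp
  constructor
  · intro h j hj
    have hperm : List.Perm covered ((List.range n).map Int.ofNat) :=
      (hnodup.subperm hsub).perm_of_length_le (by omega)
    have hjc : (j : Int) ∈ covered :=
      hperm.mem_iff.mpr (List.mem_map.mpr ⟨j, List.mem_range.mpr hj, rfl⟩)
    rcases (hmem _).mp hjc with ⟨k, hk, hP, hkj⟩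
    have hkj' : k = j := by omega
    subst hkj'; exact hP
  · intro h
    have hsub2 : ((List.range n).map Int.ofNat) ⊆ covered := by
      intro j hj
      rcases List.mem_map.mp hj with ⟨k, hk, rfl⟩
      exact (hmem _).mpr ⟨k, List.mem_range.mp hk, h k (List.mem_range.mp hk), rfl⟩
    have hperm : List.Perm covered ((List.range n).map Int.ofNat) :=
      (hnodup.subperm hsub).antisymm (hSnodup.subperm hsub2)
    rw [hperm.length_eq, hSlen]

theorem is_transversal_spec : Claim_equal_is_transversal := by
  intro transversal family _
  unfold Spec_is_transversal
  rw [Bool.eq_iff_iff, pvA_iff, pvB_iff]
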